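-- pv_equiv track=rewrite | github.com/SESCNCFUARTYOM/Algorithm | HW-3.py | calc
-- ===== SOURCE A (Python) =====
-- def calc(prog, val):
--     acc = val
--     for i in prog:
--         if i == '1':
--             acc += 3
--         elif i == '2':
--             acc *= 2
--     return acc
-- ===== SOURCE B (Python) =====
-- def calc(prog, val):
--     # Fold the program into one affine map m*x + c, then apply it to val once.
--     m, c = 1, 0
--     for i in prog:
--         if i == '1':
--             c += 3
--         elif i == '2':
--             m *= 2
--             c *= 2
--     return m * val + c
-- ===== Notes on version B (the rewrite author's own statement) =====
-- stated objective: alternative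
-- what changed: B folds the program string into a composed affine transform (multiplier, constant) independent of val and applies it to val once at the end, instead of mutating the accumulator seeded with val.
import Mathlib
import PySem

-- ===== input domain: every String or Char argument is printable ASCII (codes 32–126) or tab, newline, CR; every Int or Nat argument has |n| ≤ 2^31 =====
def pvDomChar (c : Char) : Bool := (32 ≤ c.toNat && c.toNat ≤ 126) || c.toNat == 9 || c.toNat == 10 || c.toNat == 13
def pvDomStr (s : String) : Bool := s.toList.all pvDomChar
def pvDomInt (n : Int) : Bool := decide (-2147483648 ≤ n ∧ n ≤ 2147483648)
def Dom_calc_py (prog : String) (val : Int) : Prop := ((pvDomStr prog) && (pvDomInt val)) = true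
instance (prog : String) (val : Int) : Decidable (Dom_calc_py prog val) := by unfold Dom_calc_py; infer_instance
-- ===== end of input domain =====

-- B folds the program into one affine map (m, c) and applies it to val once; same O(n) cost, different decomposition.

-- ===== PORT A =====
def calc_py (prog : String) (val : Int) : Int :=
  prog.toList.foldl (fun acc i => if i = '1' then acc + 3 else if i = '2' then acc * 2 else acc) val

-- ===== PORT B =====
def calc_py_alt (prog : String) (val : Int) : Int :=
  let mc := prog.toList.foldl
    (fun (p : Int × Int) i =>
      if i = '1' then (p.1, p.2 + 3)
      else if i = '2' then (p.1 * 2, p.2 * 2)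
      else p) (1, 0)
  mc.1 * val + mc.2

-- ===== PRECONDITION & SPEC =====
def Spec_calc_py (prog : String) (val : Int) (out : Int) : Prop := out = calc_py_alt prog val
instance (prog : String) (val : Int) (out : Int) : Decidable (Spec_calc_py prog val out) := by unfold Spec_calc_py; infer_instance

-- ===== CLAIM (what is proved, stated in full; the proofs are below) =====
def Claim_equal_calc_py : Prop := ∀ (prog : String) (val : Int), Dom_calc_py prog val → Spec_calc_py prog val (calc_py prog val)

-- ===== LEMMAS AND PROOFS =====
theorem calc_affine (l : List Char) (m c val : Int) :
    l.foldl (fun acc i => if i = '1' then acc + 3 else if i = '2' then acc * 2 else acc) (m * val + c)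
      = (l.foldl (fun (p : Int × Int) i =>
          if i = '1' then (p.1, p.2 + 3)
          else if i = '2' then (p.1 * 2, p.2 * 2)
          else p) (m, c)).1 * val
        + (l.foldl (fun (p : Int × Int) i =>
          if i = '1' then (p.1, p.2 + 3)
          else if i = '2' then (p.1 * 2, p.2 * 2)
          else p) (m, c)).2 := by
  induction l generalizing m c with
  | nil => simp
  | cons h t ih =>
    simp only [List.foldl_cons]
    split_ifs with h1 h2
    · rw [show m * val + c + 3 = m * val + (c + 3) by ring]; exact ih m (c + 3)
    · rw [show (m * val + c) * 2 = m * 2 * val + c * 2 by ring]; exact ih (m * 2) (c * 2)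
    · exact ih m c

-- ===== VERDICT (by name: the statement is the Claim_ definition above) =====
theorem calc_py_spec : Claim_equal_calc_py := by
  intro prog val _
  unfold Spec_calc_py calc_py calc_py_alt
  simpa using calc_affine prog.toList 1 0 val
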